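-- pv_equiv track=rewrite | github.com/ethicalhackingplayground/TProxer | TProx.py | generateTraversal
-- ===== SOURCE A (Python) =====
-- def generateTraversal(path, payload, statusTestCase):
--
-- 	# Generate the 400 test scenerios
-- 	if statusTestCase == "400":
-- 		finalPayload=""
-- 		slashes = path.split('/')
-- 		numSlashes = len(slashes)-1
-- 		for _ in range(0,numSlashes+5):
-- 			finalPayload = finalPayload + payload + "/"
--
-- 	# Generate the 404 test scenerios
-- 	else:
-- 		finalPayload=""
-- 		slashes = path.split('/')
-- 		numSlashes = len(slashes)-1
-- 		for _ in range(1,numSlashes):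
-- 			finalPayload = finalPayload + payload + "/"
--
-- 	# Additional path checks for the final traversal payload
-- 	if (path.endswith("/")):
-- 		return path + finalPayload
-- 	else:
-- 		return path + "/" + finalPayload
-- ===== SOURCE B (Python) =====
-- def generateTraversal(path, payload, statusTestCase):
--     # Build the repeated traversal payload by binary doubling
--     # (exponentiation-by-squaring on strings) instead of one-copy-at-a-time
--     # accumulation; the loop simply never runs when the count is <= 0.
--     depth = len(path.split('/')) - 1
--     n = depth + 5 if statusTestCase == "400" else depth - 1
--     piece = payload + "/"
--     finalPayload = ""
--     while n > 0:
--         if n & 1: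
--             finalPayload += piece
--         piece += piece
--         n >>= 1
--     sep = "" if path.endswith("/") else "/"
--     return path + sep + finalPayload
-- ===== Notes on version B (the rewrite author's own statement) =====
-- stated objective: alternative
-- what changed: Replaces A's two per-branch one-copy-at-a-time accumulation loops with a single arithmetic count and a binary-doubling (exponentiation-by-squaring) while-loop that builds the repeated payload in O(log n) concatenations.
import Mathlib
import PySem

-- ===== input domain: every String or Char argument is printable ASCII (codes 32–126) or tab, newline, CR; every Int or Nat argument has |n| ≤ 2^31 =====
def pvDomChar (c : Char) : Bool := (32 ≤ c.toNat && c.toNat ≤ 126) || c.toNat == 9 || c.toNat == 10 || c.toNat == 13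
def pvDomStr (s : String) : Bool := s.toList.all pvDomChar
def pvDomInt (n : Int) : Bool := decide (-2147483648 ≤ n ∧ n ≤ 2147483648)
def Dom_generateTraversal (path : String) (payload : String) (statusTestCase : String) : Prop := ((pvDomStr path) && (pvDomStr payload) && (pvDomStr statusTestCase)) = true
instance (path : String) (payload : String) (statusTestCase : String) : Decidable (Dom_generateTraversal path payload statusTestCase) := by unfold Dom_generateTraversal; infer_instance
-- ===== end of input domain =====

-- B replaces A's one-copy-at-a-time accumulation loops with one arithmetic count
-- and a binary-doubling repetition loop; objective: alternative algorithm.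


-- ===== PORT A =====
def generateTraversal (path : String) (payload : String) (statusTestCase : String) : String :=
  let finalPayload : List Char :=
    if statusTestCase == "400" then
      let slashes := PySem.Chars.splitOn path.toList "/".toList
      let numSlashes : Int := (slashes.length : Int) - 1
      (PySem.List.pyRange 0 (numSlashes + 5) 1).foldl
        (fun acc _ => acc ++ (payload.toList ++ ['/'])) []
    else
      let slashes := PySem.Chars.splitOn path.toList "/".toList
      let numSlashes : Int := (slashes.length : Int) - 1
      (PySem.List.pyRange 1 numSlashes 1).foldl
        (fun acc _ => acc ++ (payload.toList ++ ['/'])) []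
  if PySem.Str.endswith path "/" then String.ofList (path.toList ++ finalPayload)
  else String.ofList (path.toList ++ '/' :: finalPayload)

-- ===== PORT B =====
-- 'while n > 0: if n & 1: out += piece; piece += piece; n >>= 1' — the loop runs
-- only for n > 0, so iterating on n.toNat (0 for n ≤ 0) is exact; '>> 1' on a
-- positive int is '/ 2' and 'n & 1' is 'n % 2'.
def pvBinRepeat (piece out : List Char) (n : Nat) : List Char :=
  if h : n = 0 then out
  else pvBinRepeat (piece ++ piece) (if n % 2 = 1 then out ++ piece else out) (n / 2)
  decreasing_by exact Nat.div_lt_self (Nat.pos_of_ne_zero h) (by omega)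

def generateTraversal_alt (path : String) (payload : String) (statusTestCase : String) : String :=
  let depth : Int := ((PySem.Chars.splitOn path.toList "/".toList).length : Int) - 1
  let n : Int := if statusTestCase == "400" then depth + 5 else depth - 1
  let finalPayload : List Char := pvBinRepeat (payload.toList ++ ['/']) [] n.toNat
  let sep : List Char := if PySem.Str.endswith path "/" then [] else ['/']
  String.ofList (path.toList ++ sep ++ finalPayload)

-- ===== PRECONDITION & SPEC =====
def Spec_generateTraversal (path : String) (payload : String) (statusTestCase : String) (out : String) : Prop := out = generateTraversal_alt path payload statusTestCase
instance (path : String) (payload : String) (statusTestCase : String) (out : String) : Decidable (Spec_generateTraversal path payload statusTestCase out) := by unfold Spec_generateTraversal; infer_instance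

-- ===== CLAIM (what is proved, stated in full; the proofs are below) =====
def Claim_equal_generateTraversal : Prop := ∀ (path : String) (payload : String) (statusTestCase : String), Dom_generateTraversal path payload statusTestCase → Spec_generateTraversal path payload statusTestCase (generateTraversal path payload statusTestCase)

-- ===== LEMMAS AND PROOFS =====

-- A's accumulation loop over range(a, a+n) appends n copies of the chunk c.
lemma foldl_range_append_replicate {α : Type} (c : List α) (n : Nat) :
    ∀ (a : Int) (init : List α),
      (PySem.List.pyRange a (a + (n : Int)) 1).foldl (fun acc _ => acc ++ c) init
        = init ++ (List.replicate n c).flatten := by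
  induction n with
  | zero =>
    intro a init
    rw [PySem.List.pyRange_one_eq_nil (by simp)]
    simp
  | succ n ih =>
    intro a init
    rw [show a + ((n + 1 : Nat) : Int) = (a + 1) + (n : Int) by push_cast; ring]
    rw [PySem.List.pyRange_one_cons (by omega)]
    simp only [List.foldl_cons]
    rw [ih (a + 1) (init ++ c)]
    simp [List.replicate_succ, List.append_assoc]

-- The loop over range(a, b) appends (b - a).toNat copies (none for b ≤ a).
lemma foldl_range_append_flatten {α : Type} (c : List α) (a b : Int) :
    (PySem.List.pyRange a b 1).foldl (fun acc _ => acc ++ c) []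
      = (List.replicate (b - a).toNat c).flatten := by
  by_cases h : a ≤ b
  · have hb : b = a + (((b - a).toNat : Nat) : Int) := by omega
    conv_lhs => rw [hb]
    rw [foldl_range_append_replicate c (b - a).toNat a []]
    simp
  · rw [PySem.List.pyRange_one_eq_nil (by omega)]
    have : (b - a).toNat = 0 := by omega
    simp [this]

-- Doubling the chunk halves the copy count.
lemma flatten_replicate_double {α : Type} (c : List α) (m : Nat) :
    (List.replicate m (c ++ c)).flatten = (List.replicate (2 * m) c).flatten := by
  induction m with
  | zero => simp
  | succ m ih =>
    rw [show 2 * (m + 1) = (2 * m) + 1 + 1 by ring]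
    simp [List.replicate_succ, ih, List.append_assoc]

-- B's binary-doubling loop builds exactly n copies of the chunk.
lemma pvBinRepeat_eq_flatten_replicate (piece out : List Char) (n : Nat) :
    pvBinRepeat piece out n = out ++ (List.replicate n piece).flatten := by
  induction n using Nat.strong_induction_on generalizing piece out with
  | _ n ih =>
    rw [pvBinRepeat]
    by_cases h : n = 0
    · simp [h]
    · simp only [h, dite_false]
      rw [ih (n / 2) (Nat.div_lt_self (Nat.pos_of_ne_zero h) (by omega))]
      rw [flatten_replicate_double]
      have hn : n = n % 2 + 2 * (n / 2) := by omega
      conv_rhs => rw [hn]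
      rw [List.replicate_add, List.flatten_append]
      rcases Nat.mod_two_eq_zero_or_one n with h2 | h2 <;>
        simp [h2, List.append_assoc]

-- ===== VERDICT (by name: the statement is the Claim_ definition above) =====
theorem generateTraversal_spec : Claim_equal_generateTraversal := by
  intro path payload statusTestCase _
  unfold Spec_generateTraversal generateTraversal generateTraversal_alt
  by_cases h : statusTestCase == "400" <;>
  by_cases he : PySem.Chars.endswith path.toList ['/'] <;>
  simp [h, he, pvBinRepeat_eq_flatten_replicate, foldl_range_append_flatten,
        List.append_assoc]
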